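-- pv_equiv track=rewrite | github.com/erinseepersad/assignment-7-8-9-10 | seepersadErin_assign7_part1.py | string_isalpha
-- ===== SOURCE A (Python) =====
-- def string_isalpha(x):
--     boo=True
--     if x==(""):#do if statement for an empty string
--         boo=False
--     else:
--         for i in x:
--             table=ord(i)
--             if table >= 65 and table<=90:
--                 boo=True
--             elif table >= 97 and table <=122:
--                 boo=True
--             else:# if there one character that is not an alpha bedded character then you can directly return false( number or special character)
--                 return False
--     return boo
-- ===== SOURCE B (Python) =====
-- import re
--
-- _ALPHA = re.compile(r'[A-Za-z]+')
--
-- def string_isalpha(x):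
--     return _ALPHA.fullmatch(x) is not None
-- ===== Notes on version B (the rewrite author's own statement) =====
-- stated objective: idiomatic
-- what changed: Replaced the explicit per-character ord-range loop with early return by a single regex fullmatch of [A-Za-z]+, whose + quantifier also handles the empty-string case.
import Mathlib
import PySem

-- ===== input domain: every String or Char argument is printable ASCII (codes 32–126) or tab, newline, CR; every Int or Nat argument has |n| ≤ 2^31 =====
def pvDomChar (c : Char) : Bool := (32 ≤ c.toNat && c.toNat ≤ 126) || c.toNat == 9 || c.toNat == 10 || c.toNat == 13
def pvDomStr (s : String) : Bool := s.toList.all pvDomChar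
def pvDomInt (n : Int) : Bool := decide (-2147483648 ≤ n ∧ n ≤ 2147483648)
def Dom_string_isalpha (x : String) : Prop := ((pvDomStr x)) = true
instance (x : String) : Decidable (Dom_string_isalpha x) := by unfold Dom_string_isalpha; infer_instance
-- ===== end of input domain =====

-- B replaces A's explicit ord-range loop with a regex fullmatch of [A-Za-z]+ (idiomatic, same cost).
-- ===== PORT A =====
-- the for-loop over x: boo starts (and is only ever re-set to) True, early-return False on a non-letter
def stringIsalphaLoop : List Char → Bool
  | [] => true
  | i :: rest =>
    let table := i.toNat
    if 65 ≤ table ∧ table ≤ 90 then stringIsalphaLoop rest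
    else if 97 ≤ table ∧ table ≤ 122 then stringIsalphaLoop rest
    else false

def string_isalpha (x : String) : Bool :=
  if x = "" then false else stringIsalphaLoop x.toList

-- ===== PORT B =====
-- regex fullmatch of [A-Za-z]+ : the character class as a predicate, '+' = nonempty ∧ all match
def reAlphaClass (c : Char) : Bool :=
  ('A' ≤ c && c ≤ 'Z') || ('a' ≤ c && c ≤ 'z')

def string_isalpha_alt (x : String) : Bool :=
  !x.toList.isEmpty && x.toList.all reAlphaClass

-- ===== PRECONDITION & SPEC =====
def Spec_string_isalpha (x : String) (out : Bool) : Prop := out = string_isalpha_alt x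
instance (x : String) (out : Bool) : Decidable (Spec_string_isalpha x out) := by unfold Spec_string_isalpha; infer_instance

-- ===== CLAIM (what is proved, stated in full; the proofs are below) =====
def Claim_equal_string_isalpha : Prop := ∀ (x : String), Dom_string_isalpha x → Spec_string_isalpha x (string_isalpha x)

-- ===== LEMMAS AND PROOFS =====

-- ===== VERDICT (by name: the statement is the Claim_ definition above) =====
theorem loop_eq_all (l : List Char) : stringIsalphaLoop l = l.all reAlphaClass := by
  induction l with
  | nil => rfl
  | cons c rest ih =>
    simp only [stringIsalphaLoop, List.all_cons, reAlphaClass]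
    rcases c with ⟨n, hn⟩
    by_cases h1 : 65 ≤ n.toNat ∧ n.toNat ≤ 90
    · simp [h1, ih, Char.le_def, UInt32.le_iff_toNat_le, Char.toNat] at *
      try omega
    · by_cases h2 : 97 ≤ n.toNat ∧ n.toNat ≤ 122
      all_goals
        simp [h1, h2, ih, Char.le_def, UInt32.le_iff_toNat_le, Char.toNat] at *
        try omega

theorem string_isalpha_spec : Claim_equal_string_isalpha := by
  intro x _
  unfold Spec_string_isalpha string_isalpha string_isalpha_alt
  rw [loop_eq_all]
  by_cases h : x = ""
  · subst h; rfl
  · have : x.toList ≠ [] := by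
      simpa [String.toList_eq_nil_iff] using h
    simp [h, this]
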